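-- pv_equiv track=rewrite | github.com/the-alex-g/5e_monster_parser | parser.py | save_profs
-- ===== SOURCE A (Python) =====
-- def format_bonus(bonus):
--     if bonus >= 0:
--         return "+" + str(bonus)
--     else:
--         return str(bonus)
--
-- def save_profs(save_prof_list, stats, profbonus):
--     save_profs_dict = {}
--     for save in save_prof_list:
--         if save in save_profs_dict:
--             save_profs_dict[save] += profbonus
--         else:
--             save_profs_dict[save] = stats[save] + profbonus
--     save_profs_string = ""
--     for save in save_profs_dict:
--         if save_profs_string != "":
--             save_profs_string += ", "
--         bonus = save_profs_dict[save]
--         save_profs_string += save.capitalize() + " "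
--         save_profs_string += format_bonus(bonus)
--     return save_profs_string
-- ===== SOURCE B (Python) =====
-- def save_profs(save_prof_list, stats, profbonus):
--     parts = []
--     pending = save_prof_list
--     while pending:
--         save = pending[0]
--         bonus = stats[save] + profbonus
--         remaining = []
--         for x in pending[1:]:
--             if x == save:
--                 bonus += profbonus
--             else:
--                 remaining.append(x)
--         parts.append(save.capitalize() + " " + ("+" + str(bonus) if bonus >= 0 else str(bonus)))
--         pending = remaining
--     return ", ".join(parts)
-- ===== Notes on version B (the rewrite author's own statement) =====
-- stated objective: alternative
-- what changed: Replaces A's dict-building pass plus dict-iteration string fold by a worklist partition loop: repeatedly take the first pending save, sweep the rest once to accumulate its bonus and filter out its duplicates, emit one formatted part, and continue on the filtered remainder; no dictionary is built at all and the output is assembled with ', '.join.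
import Mathlib
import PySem

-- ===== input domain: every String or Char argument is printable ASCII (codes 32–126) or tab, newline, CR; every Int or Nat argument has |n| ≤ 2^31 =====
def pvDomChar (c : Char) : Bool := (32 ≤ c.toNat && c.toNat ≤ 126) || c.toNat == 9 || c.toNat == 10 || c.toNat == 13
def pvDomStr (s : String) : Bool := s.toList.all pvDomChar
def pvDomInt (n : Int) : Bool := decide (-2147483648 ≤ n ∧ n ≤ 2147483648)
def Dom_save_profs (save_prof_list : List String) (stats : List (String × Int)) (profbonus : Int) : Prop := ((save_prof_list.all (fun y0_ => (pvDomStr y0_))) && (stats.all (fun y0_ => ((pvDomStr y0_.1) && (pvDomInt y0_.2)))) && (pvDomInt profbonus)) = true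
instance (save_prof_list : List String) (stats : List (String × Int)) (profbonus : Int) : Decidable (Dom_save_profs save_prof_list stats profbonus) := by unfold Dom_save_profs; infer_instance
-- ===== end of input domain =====

-- B drops A's dict entirely: a worklist loop partitions the pending saves around their first element, accumulating that save's bonus while filtering out its duplicates, and joins the parts (objective: alternative decomposition).

-- ===== PORT A =====
-- str.capitalize(): exact hand port on the ASCII domain (upper first char, lower the rest)
def pyCapitalize (s : String) : String :=
  match s.toList with
  | [] => ""
  | c :: rest => String.ofList (PySem.Chars.upperChar c :: PySem.Chars.lower rest)

def format_bonus (bonus : Int) : String :=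
  if bonus ≥ 0 then "+" ++ PySem.Int.toStr bonus else PySem.Int.toStr bonus

-- the body of A's first loop
def stepA (stats : PySem.Dict String Int) (profbonus : Int)
    (d : PySem.Dict String Int) (save : String) : PySem.Dict String Int :=
  match d.get? save with
  | some v => d.insert save (v + profbonus)                       -- save_profs_dict[save] += profbonus
  | none   => d.insert save (stats.getD save 0 + profbonus)      -- save_profs_dict[save] = stats[save] + profbonus (Pre_ rules out KeyError)

def save_profs (save_prof_list : List String) (stats : List (String × Int)) (profbonus : Int) : String :=
  let sd : PySem.Dict String Int := PySem.Dict.mk stats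
  let d := save_prof_list.foldl (stepA sd profbonus) PySem.Dict.empty
  d.items.foldl (fun s p =>
    (if s ≠ "" then s ++ ", " else s)
      ++ pyCapitalize p.1 ++ " " ++ format_bonus (d.getD p.1 0)) ""

-- ===== PORT B =====
-- ", ".join(parts): exact hand port of str.join specialised to the separator ", "
def joinComma : List String → String
  | [] => ""
  | [x] => x
  | x :: y :: xs => x ++ ", " ++ joinComma (y :: xs)

-- the body of B's inner for-loop over pending[1:]: state is (bonus, remaining)
def partStep (save : String) (pb : Int) (st : Int × List String) (x : String) : Int × List String :=
  if x = save then (st.1 + pb, st.2) else (st.1, st.2 ++ [x])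

-- what one partition sweep computes (also justifies termination of the worklist loop)
theorem part_fold (save : String) (pb : Int) :
    ∀ (rest : List String) (b : Int) (r : List String),
      rest.foldl (partStep save pb) (b, r)
        = (b + (rest.count save : Int) * pb, r ++ rest.filter (fun x => x ≠ save)) := by
  intro rest
  induction rest with
  | nil => intro b r; simp
  | cons x t ih =>
    intro b r
    simp only [List.foldl_cons, partStep]
    by_cases h : x = save
    · subst h
      rw [if_pos rfl, ih]
      simp [List.count_cons_self]
      ring
    · rw [if_neg h, ih]
      have hc : t.count save = (x :: t).count save := by
        rw [List.count_cons, if_neg (by simpa using h)]; ring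
      simp [← hc, h, List.append_assoc]

-- B's while loop: emit a part for the first pending save, recurse on the filtered remainder
def save_profs_alt_go (sd : PySem.Dict String Int) (pb : Int) : List String → List String
  | [] => []
  | save :: rest =>
    let st := rest.foldl (partStep save pb) (sd.getD save 0 + pb, ([] : List String))
    (pyCapitalize save ++ " "
        ++ (if st.1 ≥ 0 then "+" ++ PySem.Int.toStr st.1 else PySem.Int.toStr st.1))
      :: save_profs_alt_go sd pb st.2
termination_by l => l.length
decreasing_by
  simp only [List.foldl_attach]
  rw [part_fold]
  simpa using Nat.lt_succ_of_le (List.length_filter_le _ _)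

def save_profs_alt (save_prof_list : List String) (stats : List (String × Int)) (profbonus : Int) : String :=
  joinComma (save_profs_alt_go (PySem.Dict.mk stats) profbonus save_prof_list)

-- ===== PRECONDITION & SPEC =====
-- Pre_ excludes exactly the inputs where Python's stats[save] raises KeyError (a save missing from stats); both A and B raise there.
def Pre_save_profs (save_prof_list : List String) (stats : List (String × Int)) (profbonus : Int) : Prop :=
  ∀ s ∈ save_prof_list, (PySem.Dict.mk stats).contains s = true

instance (save_prof_list : List String) (stats : List (String × Int)) (profbonus : Int) : Decidable (Pre_save_profs save_prof_list stats profbonus) := by unfold Pre_save_profs; infer_instance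

def pvWitness_save_profs : List String × (List (String × Int)) × Int :=
  (["str", "dex", "str"], [("str", 4), ("dex", 2)], 3)

def Spec_save_profs (save_prof_list : List String) (stats : List (String × Int)) (profbonus : Int) (out : String) : Prop := out = save_profs_alt save_prof_list stats profbonus
instance (save_prof_list : List String) (stats : List (String × Int)) (profbonus : Int) (out : String) : Decidable (Spec_save_profs save_prof_list stats profbonus out) := by unfold Spec_save_profs; infer_instance

-- ===== CLAIM (what is proved, stated in full; the proofs are below) =====
def Claim_equal_save_profs : Prop := ∀ (save_prof_list : List String) (stats : List (String × Int)) (profbonus : Int), Dom_save_profs save_prof_list stats profbonus → Pre_save_profs save_prof_list stats profbonus → Spec_save_profs save_prof_list stats profbonus (save_profs save_prof_list stats profbonus)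

-- ===== LEMMAS AND PROOFS =====

-- the common entry formatter both sides are reduced to
def entryFor (sd : PySem.Dict String Int) (pb : Int) (l : List String) (s : String) : String :=
  pyCapitalize s ++ " " ++ format_bonus (sd.getD s 0 + (l.count s : Int) * pb)

-- ---- A-side ----

-- get? on a dict literally built as a map over a nodup key list
theorem get?_mkMap (f : String → Int) (seen : List String) (x : String) :
    (PySem.Dict.mk (seen.map (fun s => (s, f s)))).get? x
      = if x ∈ seen then some (f x) else none := by
  induction seen with
  | nil => simp [PySem.Dict.get?]
  | cons a t ih =>
    simp only [List.map_cons, PySem.Dict.get?_mk_cons, List.mem_cons]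
    by_cases h : a = x
    · subst h; simp
    · simp [h, ih, Ne.symm h]

-- A's first loop, with the accumulator generalised to an arbitrary dict in map form
theorem loop_items (sd : PySem.Dict String Int) (pb : Int) :
    ∀ (l seen : List String) (f : String → Int), seen.Nodup →
    (l.foldl (stepA sd pb) (PySem.Dict.mk (seen.map (fun s => (s, f s))))).items
      = (PySem.Set.update seen l).map
          (fun s => (s, (if s ∈ seen then f s else sd.getD s 0) + (l.count s : Int) * pb)) := by
  intro l
  induction l with
  | nil =>
    intro seen f hnd
    rw [PySem.Set.update_nil]
    refine (List.map_congr_left ?_).symm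
    intro s hs
    simp [hs]
  | cons x t ih =>
    intro seen f hnd
    rw [List.foldl_cons, PySem.Set.update_cons]
    by_cases hm : x ∈ seen
    · -- repeated key: overwrite in place
      have hstep : stepA sd pb (PySem.Dict.mk (seen.map (fun s => (s, f s)))) x
          = PySem.Dict.mk (seen.map (fun s => (s, if s = x then f x + pb else f s))) := by
        unfold stepA
        rw [get?_mkMap f seen x, if_pos hm]
        apply PySem.Dict.ext
        rw [PySem.Dict.items_insert_of_contains _ _ (by
          rw [PySem.Dict.contains_eq_isSome_get?, get?_mkMap f seen x, if_pos hm]; rfl)]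
        simp only [List.map_map]
        refine List.map_congr_left ?_
        intro s hs
        by_cases hsx : s = x
        · subst hsx; simp
        · simp [hsx]
      rw [hstep, ih seen _ hnd, PySem.Set.add_of_mem hm]
      refine List.map_congr_left ?_
      intro s hs
      by_cases hsx : s = x
      · subst hsx
        simp only [if_pos hm, List.count_cons_self, Prod.mk.injEq, true_and]
        push_cast; ring
      · have : (x :: t).count s = t.count s := by
          rw [List.count_cons, if_neg (by simpa using Ne.symm hsx)]
          ring
        simp [hsx, this]
    · -- fresh key: append
      have hstep : stepA sd pb (PySem.Dict.mk (seen.map (fun s => (s, f s)))) x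
          = PySem.Dict.mk ((seen ++ [x]).map
              (fun s => (s, if s = x then sd.getD x 0 + pb else f s))) := by
        unfold stepA
        rw [get?_mkMap f seen x, if_neg hm]
        apply PySem.Dict.ext
        rw [PySem.Dict.items_insert_of_not_contains _ _ (by
          rw [PySem.Dict.contains_eq_isSome_get?, get?_mkMap f seen x, if_neg hm]; rfl)]
        simp only [List.map_append, List.map_cons, List.map_nil]
        congr 1
        refine List.map_congr_left ?_
        intro s hs
        have hsx : s ≠ x := fun h => hm (h ▸ hs)
        simp [hsx]
      have hnd' : (seen ++ [x]).Nodup := by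
        simp [List.nodup_append, hnd]
        exact fun a ha h => hm (h ▸ ha)
      rw [hstep, ih (seen ++ [x]) _ hnd', PySem.Set.add_of_not_mem hm]
      refine List.map_congr_left ?_
      intro s hs
      by_cases hsx : s = x
      · subst hsx
        simp only [List.mem_append, List.mem_singleton, or_true, if_true, if_neg hm, List.count_cons_self, Prod.mk.injEq, true_and]
        push_cast; ring
      · have hc : (x :: t).count s = t.count s := by
          rw [List.count_cons, if_neg (by simpa using Ne.symm hsx)]
          ring
        by_cases hss : s ∈ seen
        · simp [hss, hsx, hc]
        · simp [hss, hsx, hc]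

-- the items of A's dict, at the real start state
theorem items_of_A (stats : List (String × Int)) (pb : Int) (l : List String) :
    (l.foldl (stepA (PySem.Dict.mk stats) pb) PySem.Dict.empty).items
      = (PySem.List.dedup l).map
          (fun s => (s, (PySem.Dict.mk stats).getD s 0 + (l.count s : Int) * pb)) := by
  have h0 : (PySem.Dict.empty : PySem.Dict String Int)
      = PySem.Dict.mk (([] : List String).map (fun s => (s, (0 : Int)))) := rfl
  rw [h0, loop_items (PySem.Dict.mk stats) pb l [] (fun _ => 0) List.nodup_nil]
  have hupd : PySem.Set.update ([] : PySem.Set String) l = PySem.List.dedup l := by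
    rw [PySem.List.dedup_eq_ofList, PySem.Set.ofList_eq_foldl]; rfl
  rw [hupd]
  refine List.map_congr_left ?_
  intro s _
  simp

-- a string with a space inside is not empty
theorem part_ne_empty (a b : String) : a ++ " " ++ b ≠ "" := by
  intro h
  have := congrArg String.length h
  simp only [String.length_append] at this
  have h1 : (" " : String).length = 1 := rfl
  have h2 : ("" : String).length = 0 := rfl
  omega

-- pulling a prefix out of the separator fold
theorem foldl_sep_shift {α : Type} (E : α → String) :
    ∀ (t : List α) (a b : String),
      t.foldl (fun s p => s ++ (", " ++ E p)) (a ++ b)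
        = a ++ t.foldl (fun s p => s ++ (", " ++ E p)) b := by
  intro t
  induction t with
  | nil => intro a b; rfl
  | cons q t ih =>
    intro a b
    simp only [List.foldl_cons]
    rw [String.append_assoc, ih]

theorem append_sep_ne_empty {α : Type} (E : α → String) (acc : String) (h : acc ≠ "") (q : α) :
    acc ++ (", " ++ E q) ≠ "" := by
  intro hc
  have := congrArg String.length hc
  simp only [String.length_append] at this
  have h2 : ("" : String).length = 0 := rfl
  have h1 : acc.length ≠ 0 := fun hl => h (String.length_eq_zero_iff.mp hl)
  omega

-- once the accumulator is nonempty the if-branch always fires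
theorem fold_if_eq_sep {α : Type} (E : α → String) :
    ∀ (t : List α) (acc : String), acc ≠ "" →
      t.foldl (fun s p => (if s ≠ "" then s ++ ", " else s) ++ E p) acc
        = t.foldl (fun s p => s ++ (", " ++ E p)) acc := by
  intro t
  induction t with
  | nil => intro acc _; rfl
  | cons q t ih =>
    intro acc h
    simp only [List.foldl_cons, if_pos h, ne_eq]
    rw [String.append_assoc]
    exact ih _ (append_sep_ne_empty E acc h q)

theorem joinComma_map {α : Type} (E : α → String) :
    ∀ (t : List α) (p : α),
      joinComma ((p :: t).map E) = t.foldl (fun s q => s ++ (", " ++ E q)) (E p) := by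
  intro t
  induction t with
  | nil => intro p; rfl
  | cons q t ih =>
    intro p
    have : joinComma ((p :: q :: t).map E)
        = E p ++ ", " ++ joinComma ((q :: t).map E) := rfl
    rw [this, ih q, List.foldl_cons]
    have hsplit : E p ++ (", " ++ E q) = (E p ++ ", ") ++ E q := String.append_assoc.symm
    rw [hsplit, foldl_sep_shift E t (E p ++ ", ") (E q), String.append_assoc]

-- the string-building fold equals joinComma of the mapped parts, for nonempty parts
theorem fold_join {α : Type} (E : α → String) (hne : ∀ p, E p ≠ "") :
    ∀ (ps : List α),
      ps.foldl (fun s p => (if s ≠ "" then s ++ ", " else s) ++ E p) ""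
        = joinComma (ps.map E) := by
  intro ps
  cases ps with
  | nil => rfl
  | cons p t =>
    rw [List.foldl_cons, joinComma_map E t p]
    have h0 : ((if ("" : String) ≠ "" then "" ++ ", " else "") ++ E p) = E p := by simp
    rw [h0, fold_if_eq_sep E t (E p) (hne p)]

-- A equals joinComma of the canonical entries over the ordered-dedup'd list
theorem A_eq_canon (l : List String) (stats : List (String × Int)) (pb : Int) :
    save_profs l stats pb
      = joinComma ((PySem.List.dedup l).map (entryFor (PySem.Dict.mk stats) pb l)) := by
  unfold save_profs
  simp only []
  set sd := PySem.Dict.mk stats with hsd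
  set d := l.foldl (stepA sd pb) PySem.Dict.empty with hd
  have hitems : d.items = (PySem.List.dedup l).map
      (fun s => (s, sd.getD s 0 + (l.count s : Int) * pb)) := items_of_A stats pb l
  have hkeys : d.keys.Nodup := by
    show (d.items.map Prod.fst).Nodup
    rw [hitems, List.map_map]
    have hid : (Prod.fst ∘ fun s => (s, sd.getD s 0 + (l.count s : Int) * pb)) = id := rfl
    rw [hid, List.map_id]
    exact PySem.List.nodup_dedup l
  have hcongr : d.items.foldl (fun s p =>
      (if s ≠ "" then s ++ ", " else s)
        ++ pyCapitalize p.1 ++ " " ++ format_bonus (d.getD p.1 0)) ""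
    = d.items.foldl (fun s p =>
      (if s ≠ "" then s ++ ", " else s)
        ++ (pyCapitalize p.1 ++ " " ++ format_bonus p.2)) "" := by
    apply PySem.List.foldl_congr_mem
    intro acc p hp
    have hget : d.get? p.1 = some p.2 := by
      cases p with
      | mk k v => exact PySem.Dict.get?_of_mem_items d hp hkeys
    have : d.getD p.1 0 = p.2 := by
      rw [PySem.Dict.getD_eq_get?_getD, hget]; rfl
    rw [this]
    simp [String.append_assoc]
  rw [hcongr, hitems,
    fold_join (fun p : String × Int => pyCapitalize p.1 ++ " " ++ format_bonus p.2)
      (fun p => part_ne_empty (pyCapitalize p.1) (format_bonus p.2)) _,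
    List.map_map]
  rfl

-- ---- B-side ----

-- membership survives Set.add
theorem mem_set_add {x : String} {acc : List String} (h : x ∈ acc) (y : String) :
    x ∈ PySem.Set.add acc y := by
  unfold PySem.Set.add
  split_ifs <;> simp [h]

-- skipping the elements an accumulator already holds
theorem foldl_add_filter (s : String) :
    ∀ (l : List String) (acc : PySem.Set String), s ∈ acc →
      l.foldl PySem.Set.add acc = (l.filter (fun x => x ≠ s)).foldl PySem.Set.add acc := by
  intro l
  induction l with
  | nil => intro acc _; rfl
  | cons x t ih =>
    intro acc hm
    by_cases hx : x = s
    · subst hx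
      rw [List.foldl_cons, PySem.Set.add_of_mem hm, List.filter_cons]
      simp only [ne_eq, not_true_eq_false, decide_false, Bool.false_eq_true, if_false]
      exact ih acc hm
    · rw [List.foldl_cons, List.filter_cons]
      simp only [ne_eq, hx, not_false_eq_true, decide_true, if_true, List.foldl_cons]
      exact ih _ (mem_set_add hm _)

-- a head never seen again stays in front of the fold
theorem foldl_add_head (s : String) :
    ∀ (l : List String) (acc : List String), s ∉ l →
      l.foldl PySem.Set.add (s :: acc) = s :: l.foldl PySem.Set.add acc := by
  intro l
  induction l with
  | nil => intro acc _; rfl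
  | cons x t ih =>
    intro acc hs
    have hxs : x ≠ s := fun h => hs (h ▸ List.mem_cons_self)
    have hts : s ∉ t := fun h => hs (List.mem_cons_of_mem _ h)
    rw [List.foldl_cons, List.foldl_cons]
    have hstep : PySem.Set.add (s :: acc) x = s :: PySem.Set.add acc x := by
      unfold PySem.Set.add PySem.Set.contains
      by_cases hm : x ∈ acc
      · rw [if_pos (by simp [hm]), if_pos (by simp [hm])]
      · rw [if_neg (by simp [hxs, hm]), if_neg (by simp [hm])]
        rfl
    rw [hstep]
    exact ih _ hts

-- ordered dedup of a cons = head, then ordered dedup of the tail with the head filtered out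
theorem dedup_cons_filter (s : String) (l : List String) :
    PySem.List.dedup (s :: l) = s :: PySem.List.dedup (l.filter (fun x => x ≠ s)) := by
  have hf : s ∉ l.filter (fun x => x ≠ s) := by
    intro h
    simpa using (List.of_mem_filter h)
  calc PySem.List.dedup (s :: l)
      = l.foldl PySem.Set.add [s] := by
        rw [PySem.List.dedup_eq_ofList, PySem.Set.ofList_eq_foldl]; rfl
    _ = (l.filter (fun x => x ≠ s)).foldl PySem.Set.add [s] :=
        foldl_add_filter s l [s] List.mem_cons_self
    _ = s :: (l.filter (fun x => x ≠ s)).foldl PySem.Set.add [] :=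
        foldl_add_head s _ [] hf
    _ = s :: PySem.List.dedup (l.filter (fun x => x ≠ s)) := by
        rw [PySem.List.dedup_eq_ofList, PySem.Set.ofList_eq_foldl]

-- B's worklist loop produces exactly the canonical entries
theorem go_eq_canon (sd : PySem.Dict String Int) (pb : Int) :
    ∀ (n : Nat) (l : List String), l.length ≤ n →
      save_profs_alt_go sd pb l = (PySem.List.dedup l).map (entryFor sd pb l) := by
  intro n
  induction n with
  | zero =>
    intro l hl
    have : l = [] := List.eq_nil_of_length_eq_zero (Nat.le_zero.mp hl)
    subst this
    simp only [save_profs_alt_go]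
    rfl
  | succ n ih =>
    intro l hl
    cases l with
    | nil => simp only [save_profs_alt_go]; rfl
    | cons save rest =>
      rw [save_profs_alt_go.eq_def]
      simp only [part_fold, List.nil_append]
      set rem := rest.filter (fun x => x ≠ save) with hrem
      have hlen : rem.length ≤ n :=
        le_trans (List.length_filter_le _ _) (Nat.le_of_succ_le_succ hl)
      rw [ih rem hlen, dedup_cons_filter, List.map_cons]
      congr 1
      · -- head entry
        unfold entryFor format_bonus
        have : sd.getD save 0 + pb + (rest.count save : Int) * pb
            = sd.getD save 0 + (((save :: rest).count save : Int)) * pb := by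
          rw [List.count_cons_self]; push_cast; ring
        rw [this]
      · -- tail entries: counts agree on save-free elements
        refine List.map_congr_left ?_
        intro t ht
        have htmem : t ∈ rem := (PySem.List.mem_dedup _ _).mp ht
        have hts : t ≠ save := by
          have := List.of_mem_filter htmem
          simpa using this
        have hcount : rem.count t = (save :: rest).count t := by
          rw [hrem, List.count_filter (by simp [hts]),
            List.count_cons, if_neg (by simpa using Ne.symm hts)]
          ring
        unfold entryFor
        rw [hcount]

-- ===== VERDICT (by name: the statement is the Claim_ definition above) =====
theorem save_profs_spec : Claim_equal_save_profs := by
  intro l stats pb _ _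
  unfold Spec_save_profs save_profs_alt
  rw [A_eq_canon, go_eq_canon (PySem.Dict.mk stats) pb l.length l (le_refl _)]
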